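-- pv_equiv track=rewrite | github.com/mkoskim/moe | pymoe/extformats/moeReadRTF.py | rtf_scan
-- ===== SOURCE A (Python) =====
-- def rtf_scan(content):
--
--     def lookup(content, i):
--         if i < len(content):
--             return content[i]
--         return '\0'
--
--     def next(content, i):
--         if i < len(content):
--             return content[i], i + 1
--         return '\0', i
--
--     tokens = []
--     i = 0
--
--     while lookup(content, i) != '\0':
--         c, i = next(content, i)
--         if c == "{":
--             tokens.append("{")
--         elif c == "}":
--             tokens.append("}")
--         elif c == "\\":
--             word = "\\"
--             while lookup(content, i) not in "\\ \n\r\t\0{}":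
--                 c, i = next(content, i)
--                 word = word + c
--             tokens.append(word)
--         elif c in " \n\r\t":
--             word = ""
--             while lookup(content, i) in " \n\r\t":
--                 c, i = next(content, i)
--                 word = word + c
--             tokens.append(" ")
--         else:
--             word = c
--             while lookup(content, i) not in "\\ \n\r\t\0{}":
--                 c, i = next(content, i)
--                 word = word + c
--             tokens.append(word)
--
--     return tokens
-- ===== SOURCE B (Python) =====
-- def rtf_scan(content):
--     # Single left-to-right fold over characters: each char either starts a new
--     # token or merges into the last one; no lookahead, no inner scanning loops.
--     src = content.split('\0', 1)[0]
--     tokens = []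
--     for c in src:
--         if c in '{}':
--             tokens.append(c)
--         elif c in ' \n\r\t':
--             if not tokens or tokens[-1] != ' ':
--                 tokens.append(' ')
--         elif c == '\\':
--             tokens.append('\\')
--         elif tokens and tokens[-1] not in ('{', '}', ' '):
--             tokens[-1] += c
--         else:
--             tokens.append(c)
--     return tokens
-- ===== Notes on version B (the rewrite author's own statement) =====
-- stated objective: alternative
-- what changed: Replaced A's lookahead state machine (outer while with three inner delimiter-scanning while loops over an index) by a single per-character fold that classifies each character and either starts a new token or merges it into the last one, after truncating at the first NUL.
import Mathlib
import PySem

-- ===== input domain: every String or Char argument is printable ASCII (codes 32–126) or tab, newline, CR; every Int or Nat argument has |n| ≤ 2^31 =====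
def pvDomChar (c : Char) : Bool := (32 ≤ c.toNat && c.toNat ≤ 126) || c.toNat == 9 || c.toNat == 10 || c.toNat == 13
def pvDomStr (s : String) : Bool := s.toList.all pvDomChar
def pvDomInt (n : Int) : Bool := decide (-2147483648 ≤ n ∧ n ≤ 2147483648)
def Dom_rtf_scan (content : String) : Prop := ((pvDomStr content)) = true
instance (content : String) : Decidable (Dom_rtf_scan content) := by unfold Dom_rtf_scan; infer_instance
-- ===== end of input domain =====

-- B replaces A's lookahead state machine (inner while loops re-scanning for delimiters)
-- by a single per-character fold that either starts a new token or merges into the last one (objective: alternative).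

-- ===== PORT A =====
-- Characters that end a word in A's inner loops: "\\ \n\r\t\0{}"
def rtfDelim (c : Char) : Bool :=
  c = '\\' || c = ' ' || c = '\n' || c = '\r' || c = '\t' || c = '\u0000' || c = '{' || c = '}'

-- Whitespace set " \n\r\t"
def rtfWs (c : Char) : Bool := c = ' ' || c = '\n' || c = '\r' || c = '\t'

-- A's inner word loop: `while lookup(content,i) not in "\\ \n\r\t\0{}": c,i = next(...); word += c`.
-- The position i is represented by the remaining suffix of the input (lookup = head, '\0' at end = []).
def rtfWordA (word : List Char) (rest : List Char) : List Char × List Char :=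
  match rest with
  | [] => (word, [])
  | c :: cs => if rtfDelim c then (word, c :: cs) else rtfWordA (word ++ [c]) cs

-- A's inner whitespace loop: `while lookup(content,i) in " \n\r\t": c,i = next(...)`.
def rtfWsA (rest : List Char) : List Char :=
  match rest with
  | [] => []
  | c :: cs => if rtfWs c then rtfWsA cs else c :: cs

theorem rtfWordA_snd_le (word rest : List Char) : (rtfWordA word rest).2.length ≤ rest.length := by
  induction rest generalizing word with
  | nil => simp [rtfWordA]
  | cons c cs ih =>
    simp only [rtfWordA]
    split
    · simp
    · exact le_trans (ih _) (by simp)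

theorem rtfWsA_le (rest : List Char) : (rtfWsA rest).length ≤ rest.length := by
  induction rest with
  | nil => simp [rtfWsA]
  | cons c cs ih =>
    simp only [rtfWsA]
    split
    · exact le_trans ih (by simp)
    · simp

-- A's outer `while lookup(content,i) != '\0'` loop, branch for branch.
def rtfScanA : List Char → List String
  | [] => []
  | c :: cs =>
    if c = '\u0000' then []
    else if c = '{' then "{" :: rtfScanA cs
    else if c = '}' then "}" :: rtfScanA cs
    else if c = '\\' then
      String.ofList (rtfWordA ['\\'] cs).1 :: rtfScanA (rtfWordA ['\\'] cs).2
    else if rtfWs c then " " :: rtfScanA (rtfWsA cs)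
    else
      String.ofList (rtfWordA [c] cs).1 :: rtfScanA (rtfWordA [c] cs).2
termination_by l => l.length
decreasing_by
  · simp
  · simp
  · exact Nat.lt_succ_of_le (rtfWordA_snd_le _ _)
  · exact Nat.lt_succ_of_le (rtfWsA_le _)
  · exact Nat.lt_succ_of_le (rtfWordA_snd_le _ _)

def rtf_scan (content : String) : List String := rtfScanA content.toList

-- ===== PORT B =====
-- B's loop body: tokens kept in reverse (head = tokens[-1]); `tokens[-1] += c` = modify head.
def rtfStepB (acc : List (List Char)) (c : Char) : List (List Char) :=
  if c = '{' ∨ c = '}' then [c] :: acc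
  else if rtfWs c then
    match acc with
    | [] => [' '] :: acc
    | t :: _ => if t ≠ [' '] then [' '] :: acc else acc
  else if c = '\\' then ['\\'] :: acc
  else
    match acc with
    | t :: rest =>
      if t ≠ ['{'] ∧ t ≠ ['}'] ∧ t ≠ [' '] then (t ++ [c]) :: rest else [c] :: acc
    | [] => [[c]]

-- content.split('\0', 1)[0] = the prefix before the first NUL
def rtf_scan_alt (content : String) : List String :=
  (((content.toList.takeWhile (fun c => c ≠ '\u0000')).foldl rtfStepB []).reverse).map
    (fun t => String.ofList t)

-- ===== PRECONDITION & SPEC =====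
def Spec_rtf_scan (content : String) (out : List String) : Prop := out = rtf_scan_alt content
instance (content : String) (out : List String) : Decidable (Spec_rtf_scan content out) := by unfold Spec_rtf_scan; infer_instance

-- ===== CLAIM (what is proved, stated in full; the proofs are below) =====
def Claim_equal_rtf_scan : Prop := ∀ (content : String), Dom_rtf_scan content → Spec_rtf_scan content (rtf_scan content)

-- ===== LEMMAS AND PROOFS =====


-- B's else-branch ("text") characters
def rtfText (c : Char) : Prop := c ≠ '{' ∧ c ≠ '}' ∧ rtfWs c = false ∧ c ≠ '\\'

-- tokens B never extends
def rtfSpecial (t : List Char) : Prop := t = ['{'] ∨ t = ['}'] ∨ t = [' ']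

-- seam invariant: B's fold, resumed at a token boundary of A, starts a fresh token
def rtfOk (acc : List (List Char)) (l : List Char) : Prop :=
  ∀ t rest c cs, acc = t :: rest → l = c :: cs →
    (rtfWs c = true → t ≠ [' ']) ∧ (rtfText c → rtfSpecial t)

theorem rtfWordA_fst_not_special (word rest : List Char) (h : word ≠ [])
    (hs : ¬ rtfSpecial word) : ¬ rtfSpecial (rtfWordA word rest).1 := by
  induction rest generalizing word with
  | nil => simpa [rtfWordA]
  | cons c cs ih =>
    simp only [rtfWordA]
    split
    · simpa
    · refine ih _ (by simp) ?_
      rcases word with _ | ⟨w, _ | _⟩ <;> simp_all [rtfSpecial]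

theorem rtfWordA_snd_suffix (word rest : List Char) : (rtfWordA word rest).2 <:+ rest := by
  induction rest generalizing word with
  | nil => simp [rtfWordA]
  | cons c cs ih =>
    simp only [rtfWordA]
    split
    · exact List.suffix_refl _
    · exact (ih _).trans (List.suffix_cons c cs)

theorem rtfWordA_snd_head (word rest : List Char) :
    ∀ c' cs', (rtfWordA word rest).2 = c' :: cs' → rtfDelim c' = true := by
  induction rest generalizing word with
  | nil => simp [rtfWordA]
  | cons c cs ih =>
    simp only [rtfWordA]
    split
    · rename_i hd
      intro c' cs' h
      cases h
      exact hd
    · exact ih _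

theorem rtfWordA_foldl (rest : List Char) : ∀ word acc, word ≠ [] → ¬ rtfSpecial word →
    rest.foldl rtfStepB (word :: acc) =
      (rtfWordA word rest).2.foldl rtfStepB ((rtfWordA word rest).1 :: acc) := by
  induction rest with
  | nil => intro word acc _ _; simp [rtfWordA]
  | cons c cs ih =>
    intro word acc hne hs
    simp only [rtfWordA]
    split
    · rfl
    · rename_i hd
      simp only [rtfDelim, Bool.or_eq_true, decide_eq_true_eq] at hd
      push Not at hd
      obtain ⟨⟨⟨⟨⟨⟨⟨d1, d2⟩, d3⟩, d4⟩, d5⟩, d6⟩, d7⟩, d8⟩ := hd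
      have hws : rtfWs c = false := by simp [rtfWs, d2, d3, d4, d5]
      have hsp : word ≠ ['{'] ∧ word ≠ ['}'] ∧ word ≠ [' '] := by
        simpa [rtfSpecial, not_or] using hs
      have hstep : rtfStepB (word :: acc) c = (word ++ [c]) :: acc := by
        simp [rtfStepB, d7, d8, hws, d1, hsp.1, hsp.2.1, hsp.2.2]
      rw [List.foldl_cons, hstep]
      refine ih _ _ (by simp) ?_
      rcases word with _ | ⟨w, _ | _⟩ <;> simp_all [rtfSpecial]

theorem rtfWsA_suffix (rest : List Char) : rtfWsA rest <:+ rest := by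
  induction rest with
  | nil => simp [rtfWsA]
  | cons c cs ih =>
    simp only [rtfWsA]
    split
    · exact ih.trans (List.suffix_cons c cs)
    · exact List.suffix_refl _

theorem rtfWsA_head (rest : List Char) :
    ∀ c' cs', rtfWsA rest = c' :: cs' → rtfWs c' = false := by
  induction rest with
  | nil => simp [rtfWsA]
  | cons c cs ih =>
    simp only [rtfWsA]
    split
    · exact ih
    · rename_i h
      intro c' cs' he
      cases he
      simpa using h

theorem rtfWsA_foldl (rest : List Char) : ∀ acc,
    rest.foldl rtfStepB ([' '] :: acc) = (rtfWsA rest).foldl rtfStepB ([' '] :: acc) := by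
  induction rest with
  | nil => intro acc; simp [rtfWsA]
  | cons c cs ih =>
    intro acc
    simp only [rtfWsA]
    split
    · rename_i hws
      have hc : ¬ (c = '{' ∨ c = '}') := by
        rintro (h | h) <;> subst h <;> simp [rtfWs] at hws
      have : rtfStepB ([' '] :: acc) c = [' '] :: acc := by
        simp [rtfStepB, hc, hws]
      rw [List.foldl_cons, this, ih]
    · rfl

theorem rtfMain : ∀ (n : Nat) (l : List Char) (acc : List (List Char)), l.length ≤ n →
    (∀ c ∈ l, c ≠ '\u0000') → rtfOk acc l →
    ((l.foldl rtfStepB acc).reverse).map (fun t => String.ofList t) =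
      (acc.reverse.map (fun t => String.ofList t)) ++ rtfScanA l := by
  intro n
  induction n with
  | zero =>
    intro l acc hl _ _
    have : l = [] := List.eq_nil_of_length_eq_zero (Nat.le_zero.mp hl)
    subst this
    simp [rtfScanA]
  | succ n ih =>
    intro l acc hl hn hok
    match l with
    | [] => simp [rtfScanA]
    | c :: cs =>
      have hc0 : c ≠ '\u0000' := hn c (by simp)
      have hcs : cs.length ≤ n := Nat.le_of_succ_le_succ hl
      rw [rtfScanA, if_neg hc0]
      by_cases h1 : c = '{'
      · subst h1
        have hstep : rtfStepB acc '{' = ['{'] :: acc := by simp [rtfStepB]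
        rw [List.foldl_cons, hstep, if_pos rfl,
          ih cs (['{'] :: acc) hcs (fun c' hc' => hn c' (by simp [hc']))
            (by intro t rest c' cs' ha hb; cases ha; exact ⟨by simp, fun _ => Or.inl rfl⟩)]
        simp
      · rw [if_neg h1]
        by_cases h2 : c = '}'
        · subst h2
          have hstep : rtfStepB acc '}' = ['}'] :: acc := by simp [rtfStepB]
          rw [List.foldl_cons, hstep,
            ih cs (['}'] :: acc) hcs (fun c' hc' => hn c' (by simp [hc']))
              (by intro t rest c' cs' ha hb; cases ha; exact ⟨by simp, fun _ => Or.inr (Or.inl rfl)⟩)]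
          simp
        · rw [if_neg h2]
          by_cases h3 : c = '\\'
          · subst h3
            have hstep : rtfStepB acc '\\' = ['\\'] :: acc := by simp [rtfStepB, rtfWs]
            have hw := rtfWordA_foldl cs ['\\'] acc (by simp) (by simp [rtfSpecial])
            have hsuf := rtfWordA_snd_suffix ['\\'] cs
            have hok' : rtfOk ((rtfWordA ['\\'] cs).1 :: acc) (rtfWordA ['\\'] cs).2 := by
              intro t rest c' cs' ha hb
              cases ha
              have hd := rtfWordA_snd_head ['\\'] cs c' cs' hb
              have hns := rtfWordA_fst_not_special ['\\'] cs (by simp) (by simp [rtfSpecial])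
              constructor
              · intro _ he
                exact hns (Or.inr (Or.inr he))
              · intro ht
                exfalso
                obtain ⟨hb1, hb2, hb3, hb4⟩ := ht
                have hmem : c' ∈ cs := hsuf.subset (by rw [hb]; simp)
                have : c' = '\u0000' := by
                  simp only [rtfDelim, Bool.or_eq_true, decide_eq_true_eq] at hd
                  rcases hd with ((((((h|h)|h)|h)|h)|h)|h)|h
                  · exact absurd h hb4
                  · subst h; simp [rtfWs] at hb3
                  · subst h; simp [rtfWs] at hb3
                  · subst h; simp [rtfWs] at hb3
                  · subst h; simp [rtfWs] at hb3
                  · exact h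
                  · exact absurd h hb1
                  · exact absurd h hb2
                exact hn c' (by simp [hmem]) this
            rw [List.foldl_cons, hstep, hw,
              ih _ _ (le_trans (rtfWordA_snd_le _ _) hcs)
                (fun c' hc' => hn c' (by simp [hsuf.subset hc'])) hok']
            simp
          · rw [if_neg h3]
            by_cases h4 : rtfWs c = true
            · rw [if_pos h4]
              have hcb : ¬ (c = '{' ∨ c = '}') := by rintro (h | h); exacts [h1 h, h2 h]
              have hstep : rtfStepB acc c = [' '] :: acc := by
                match acc with
                | [] => simp [rtfStepB, hcb, h4]
                | t :: rest =>
                  have := (hok t rest c cs rfl rfl).1 h4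
                  simp [rtfStepB, hcb, h4, this]
              have hsuf := rtfWsA_suffix cs
              rw [List.foldl_cons, hstep, rtfWsA_foldl cs acc,
                ih _ _ (le_trans (rtfWsA_le _) hcs)
                  (fun c' hc' => hn c' (by simp [hsuf.subset hc']))
                  (by
                    intro t rest c' cs' ha hb
                    cases ha
                    constructor
                    · intro hws
                      rw [rtfWsA_head cs c' cs' hb] at hws
                      cases hws
                    · exact fun _ => Or.inr (Or.inr rfl))]
              simp
            · rw [if_neg h4]
              have h4' : rtfWs c = false := by simpa using h4
              have hcsp : c ≠ ' ' := by
                intro h; rw [h] at h4'; simp [rtfWs] at h4'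
              have hcb : ¬ (c = '{' ∨ c = '}') := by rintro (h | h); exacts [h1 h, h2 h]
              have hstep : rtfStepB acc c = [c] :: acc := by
                match acc with
                | [] => simp [rtfStepB, hcb, h4', h3]
                | t :: rest =>
                  have := (hok t rest c cs rfl rfl).2 ⟨h1, h2, h4', h3⟩
                  rcases this with h | h | h <;> simp [rtfStepB, hcb, h4', h3, h]
              have hns : ¬ rtfSpecial [c] := by
                simp [rtfSpecial]
                exact ⟨h1, h2, hcsp⟩
              have hw := rtfWordA_foldl cs [c] acc (by simp) hns
              have hsuf := rtfWordA_snd_suffix [c] cs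
              have hok' : rtfOk ((rtfWordA [c] cs).1 :: acc) (rtfWordA [c] cs).2 := by
                intro t rest c' cs' ha hb
                cases ha
                have hd := rtfWordA_snd_head [c] cs c' cs' hb
                have hns' := rtfWordA_fst_not_special [c] cs (by simp) hns
                constructor
                · intro _ he
                  exact hns' (Or.inr (Or.inr he))
                · intro ht
                  exfalso
                  obtain ⟨hb1, hb2, hb3, hb4⟩ := ht
                  have hmem : c' ∈ cs := hsuf.subset (by rw [hb]; simp)
                  have : c' = '\u0000' := by
                    simp only [rtfDelim, Bool.or_eq_true, decide_eq_true_eq] at hd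
                    rcases hd with ((((((h|h)|h)|h)|h)|h)|h)|h
                    · exact absurd h hb4
                    · subst h; simp [rtfWs] at hb3
                    · subst h; simp [rtfWs] at hb3
                    · subst h; simp [rtfWs] at hb3
                    · subst h; simp [rtfWs] at hb3
                    · exact h
                    · exact absurd h hb1
                    · exact absurd h hb2
                  exact hn c' (by simp [hmem]) this
              rw [List.foldl_cons, hstep, hw,
                ih _ _ (le_trans (rtfWordA_snd_le _ _) hcs)
                  (fun c' hc' => hn c' (by simp [hsuf.subset hc'])) hok']
              simp

-- ===== VERDICT (by name: the statement is the Claim_ definition above) =====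
theorem rtf_scan_spec : Claim_equal_rtf_scan := by
  intro content hdom
  unfold Spec_rtf_scan rtf_scan rtf_scan_alt
  have hn : ∀ c ∈ content.toList, c ≠ '\u0000' := by
    intro c hc h
    have := List.all_eq_true.mp hdom c hc
    rw [h] at this
    simp [pvDomChar] at this
  have htw : content.toList.takeWhile (fun c => c ≠ '\u0000') = content.toList := by
    apply List.takeWhile_eq_self_iff.mpr
    intro c hc
    simp [hn c hc]
  rw [htw,
    rtfMain content.toList.length content.toList [] le_rfl hn
      (by intro t rest c cs ha hb; cases ha)]
  simp
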